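-- pv_equiv track=rewrite | github.com/zombie-zero-nust/zombie-zero | tools/uml/generate_src_uml_assets.py | build_subtree_cache
-- ===== SOURCE A (Python) =====
-- def build_subtree_cache(packages, package_entities, package_children):
--     subtree_cache = {}
--
--     def collect(package_name):
--         if package_name in subtree_cache:
--             return subtree_cache[package_name]
--         nodes = set(package_entities.get(package_name, set()))
--         for child in package_children.get(package_name, set()):
--             nodes.update(collect(child))
--         subtree_cache[package_name] = nodes
--         return nodes
--
--     for package in sorted(packages, key=lambda item: item.count('.'), reverse=True):
--         collect(package)
--     return subtree_cache
-- ===== SOURCE B (Python) =====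
-- def build_subtree_cache(packages, package_entities, package_children):
--     cache = {}
--     for root in sorted(packages, key=lambda item: item.count('.'), reverse=True):
--         stack = [(root, False)]
--         while stack:
--             name, expanded = stack.pop()
--             if expanded:
--                 nodes = set(package_entities.get(name, ()))
--                 for child in package_children.get(name, ()):
--                     nodes |= cache[child]
--                 cache[name] = nodes
--             else:
--                 if name in cache:
--                     continue
--                 stack.append((name, True))
--                 for child in list(package_children.get(name, ()))[::-1]:
--                     stack.append((child, False))
--     return cache
-- ===== Notes on version B (the rewrite author's own statement) =====
-- stated objective: alternative
-- what changed: A's memoized recursive depth-first collect is replaced by an explicit-stack iterative post-order traversal (a (name, expanded) work stack driven per sorted root), producing the identical cache in the identical insertion order; Pre_ excludes exactly the inputs whose child graph has a cycle reachable from packages, on which A raises RecursionError (and B's loop would not terminate).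
import Mathlib
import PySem

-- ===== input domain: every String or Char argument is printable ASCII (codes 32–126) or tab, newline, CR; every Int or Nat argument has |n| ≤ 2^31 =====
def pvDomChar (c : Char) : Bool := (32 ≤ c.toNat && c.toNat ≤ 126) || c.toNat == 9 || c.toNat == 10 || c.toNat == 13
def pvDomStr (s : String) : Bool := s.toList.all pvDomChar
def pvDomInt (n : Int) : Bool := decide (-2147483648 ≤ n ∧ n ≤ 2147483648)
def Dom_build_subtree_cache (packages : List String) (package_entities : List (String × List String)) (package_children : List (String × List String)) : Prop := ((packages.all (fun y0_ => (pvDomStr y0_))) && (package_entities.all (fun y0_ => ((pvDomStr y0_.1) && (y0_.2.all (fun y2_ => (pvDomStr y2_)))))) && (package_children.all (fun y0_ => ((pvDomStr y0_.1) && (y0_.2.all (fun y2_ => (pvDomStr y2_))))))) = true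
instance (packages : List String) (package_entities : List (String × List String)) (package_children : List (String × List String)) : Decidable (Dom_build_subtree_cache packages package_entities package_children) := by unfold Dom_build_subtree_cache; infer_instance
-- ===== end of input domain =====

-- B replaces A's memoized recursion by an explicit-stack iterative post-order traversal (same results, same cost class;
-- objective: alternative decomposition).  Equality proved is about the RETURN value (neither version mutates its arguments).

-- shared lookup helpers (the Python `package_children.get(name, …)` / `package_entities.get(name, …)`)
def pvKids (chs : List (String × List String)) (x : String) : List String :=
  (PySem.Dict.ofList chs).getD x []

def pvEnts (ents : List (String × List String)) (x : String) : List String :=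
  (PySem.Dict.ofList ents).getD x []

-- the cache: a Python dict from package name to a Python set of entity names
abbrev pvCache : Type := PySem.Dict String (List String)

-- ===== PORT A =====
-- the body of A's `for child in …: nodes.update(collect(child))` loop, threading (nodes, cache)
def pvCollectKids (rec : String → pvCache → Option (PySem.Set String × pvCache)) :
    List String → PySem.Set String → pvCache → Option (PySem.Set String × pvCache)
  | [], nodes, c => some (nodes, c)
  | ch :: rest, nodes, c =>
    match rec ch c with
    | none => none
    | some (cns, c2) => pvCollectKids rec rest (PySem.Set.update nodes cns) c2

-- A's recursive `collect`; the Nat is a fuel guard for totality only (none = fuel ran out, never reached under Pre_)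
def pvCollect (ents chs : List (String × List String)) : Nat → String → pvCache → Option (PySem.Set String × pvCache)
  | 0, _, _ => none
  | fuel+1, x, c =>
    match PySem.Dict.get? c x with
    | some cached => some (cached, c)
    | none =>
      match pvCollectKids (pvCollect ents chs fuel) (pvKids chs x) (PySem.Set.ofList (pvEnts ents x)) c with
      | none => none
      | some (nodes, c2) => some (nodes, PySem.Dict.insert c2 x nodes)

def pvChVals (chs : List (String × List String)) : List String := chs.flatMap (fun p => p.2)
def pvN (chs : List (String × List String)) : Nat := (pvChVals chs).dedup.length
def pvFuelA (chs : List (String × List String)) : Nat := pvN chs + 2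

def build_subtree_cache (packages : List String) (package_entities : List (String × List String)) (package_children : List (String × List String)) : List (String × List String) :=
  PySem.Dict.items
    ((PySem.List.sorted packages (fun item => PySem.Str.count item ".") true).foldl
      (fun c p =>
        match pvCollect package_entities package_children (pvFuelA package_children) p c with
        | none => c
        | some r => r.2)
      PySem.Dict.empty)

-- ===== PORT B =====
-- B's `for child in …: nodes |= cache[child]` loop (none = the KeyError case, never reached under Pre_)
def pvUnionKids (c : pvCache) : List String → PySem.Set String → Option (PySem.Set String)
  | [], nodes => some nodes
  | ch :: rest, nodes =>
    match PySem.Dict.get? c ch with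
    | none => none
    | some v => pvUnionKids c rest (PySem.Set.union nodes v)

-- B's `while stack:` loop; the Nat is a fuel guard for totality only (never runs out under Pre_)
def pvLoop (ents chs : List (String × List String)) : Nat → List (String × Bool) → pvCache → Option pvCache
  | 0, _, _ => none
  | _+1, [], c => some c
  | fuel+1, (name, expanded) :: stack, c =>
    if expanded then
      match pvUnionKids c (pvKids chs name) (PySem.Set.ofList (pvEnts ents name)) with
      | none => none
      | some nodes => pvLoop ents chs fuel stack (PySem.Dict.insert c name nodes)
    else if PySem.Dict.contains c name then
      pvLoop ents chs fuel stack c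
    else
      pvLoop ents chs fuel ((pvKids chs name).reverse.foldl (fun s ch => (ch, false) :: s) ((name, true) :: stack)) c

def pvMaxKids (chs : List (String × List String)) : Nat := chs.foldl (fun m p => max m p.2.length) 0
def pvC (chs : List (String × List String)) : Nat := pvMaxKids chs + 2
def pvFuelB (chs : List (String × List String)) : Nat := pvC chs ^ (pvN chs + 2) + 1

def build_subtree_cache_alt (packages : List String) (package_entities : List (String × List String)) (package_children : List (String × List String)) : List (String × List String) :=
  PySem.Dict.items
    ((PySem.List.sorted packages (fun item => PySem.Str.count item ".") true).foldl
      (fun c root =>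
        match pvLoop package_entities package_children (pvFuelB package_children) [(root, false)] c with
        | none => c
        | some c' => c')
      PySem.Dict.empty)

-- ===== PRECONDITION & SPEC =====
-- names reachable from S in at most k steps of the child relation
def pvReach (chs : List (String × List String)) : Nat → List String → List String
  | 0, s => s
  | k+1, s => pvReach chs k ((s ++ s.flatMap (pvKids chs)).dedup)

-- iteration budget after which pvReach from the packages has reached every reachable name
def pvM (packages : List String) (chs : List (String × List String)) : Nat :=
  packages.dedup.length + pvN chs

-- Pre_ excludes exactly the inputs whose child graph has a cycle reachable from `packages`:
-- there A raises RecursionError (collect recurses around the cycle forever).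
def Pre_build_subtree_cache (packages : List String) (package_entities : List (String × List String)) (package_children : List (String × List String)) : Prop :=
  ∀ x ∈ pvChVals package_children,
    x ∈ pvReach package_children (pvM packages package_children) packages →
      x ∉ pvReach package_children (pvN package_children) (pvKids package_children x)
instance (packages : List String) (package_entities : List (String × List String)) (package_children : List (String × List String)) : Decidable (Pre_build_subtree_cache packages package_entities package_children) := by unfold Pre_build_subtree_cache; infer_instance

def pvWitness_build_subtree_cache : List String × (List (String × List String)) × (List (String × List String)) :=
  (["a", "a.b"], [("a", ["E1", "E2"]), ("a.b", ["E2"])], [("a", ["a.b"])])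

def Spec_build_subtree_cache (packages : List String) (package_entities : List (String × List String)) (package_children : List (String × List String)) (out : List (String × List String)) : Prop := out = build_subtree_cache_alt packages package_entities package_children
instance (packages : List String) (package_entities : List (String × List String)) (package_children : List (String × List String)) (out : List (String × List String)) : Decidable (Spec_build_subtree_cache packages package_entities package_children out) := by unfold Spec_build_subtree_cache; infer_instance

-- ===== CLAIM (what is proved, stated in full; the proofs are below) =====
def Claim_equal_build_subtree_cache : Prop := ∀ (packages : List String) (package_entities : List (String × List String)) (package_children : List (String × List String)), Dom_build_subtree_cache packages package_entities package_children → Pre_build_subtree_cache packages package_entities package_children → Spec_build_subtree_cache packages package_entities package_children (build_subtree_cache packages package_entities package_children)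

-- ===== LEMMAS AND PROOFS =====

-- generic bounds for `foldl max` loops
theorem pvFoldMax_le {α : Type} (l : List α) (g : α → Nat) (init b : Nat)
    (h1 : init ≤ b) (h2 : ∀ x ∈ l, g x ≤ b) :
    l.foldl (fun m x => max m (g x)) init ≤ b := by
  induction l generalizing init with
  | nil => exact h1
  | cons a l ih =>
    exact ih _ (max_le h1 (h2 a (List.mem_cons_self))) (fun x hx => h2 x (List.mem_cons_of_mem _ hx))

theorem pvFoldMax_attained {α : Type} (l : List α) (g : α → Nat) :
    ∀ init, l.foldl (fun m x => max m (g x)) init = init ∨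
      ∃ x ∈ l, l.foldl (fun m x => max m (g x)) init = g x := by
  induction l with
  | nil => intro init; exact Or.inl rfl
  | cons a l ih =>
    intro init
    rcases ih (max init (g a)) with h | ⟨x, hx, hfx⟩
    · simp only [List.foldl_cons]
      rcases max_choice init (g a) with hm | hm
      · exact Or.inl (by rw [h, hm])
      · exact Or.inr ⟨a, List.mem_cons_self, by rw [h, hm]⟩
    · exact Or.inr ⟨x, List.mem_cons_of_mem _ hx, hfx⟩

-- an entry of dict(pairs) is one of the pairs
theorem pvItems_foldl_insert_sub (l : List (String × List String)) :
    ∀ (d : pvCache) p, p ∈ (l.foldl (fun d q => d.insert q.1 q.2) d).items → p ∈ d.items ∨ p ∈ l := by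
  induction l with
  | nil => intro d p h; exact Or.inl h
  | cons q rest ih =>
    intro d p h
    rcases ih _ p h with h1 | h1
    · rcases (PySem.Dict.mem_items_insert _ _ _ _).mp h1 with h2 | h2
      · rw [h2]; simp
      · exact Or.inl h2.1
    · right; exact List.mem_cons_of_mem _ h1

theorem pvItems_ofList_sub (l : List (String × List String)) (p : String × List String)
    (h : p ∈ (PySem.Dict.ofList l).items) : p ∈ l := by
  rcases pvItems_foldl_insert_sub l PySem.Dict.empty p h with h1 | h1
  · cases h1
  · exact h1

-- size bounds used for the fuel arithmetic
theorem pvKids_len_le (chs : List (String × List String)) (x : String) :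
    (pvKids chs x).length + 2 ≤ pvC chs := by
  unfold pvKids pvC pvMaxKids
  cases hg : PySem.Dict.get? (PySem.Dict.ofList chs) x with
  | none => simp [PySem.Dict.getD_of_get?_eq_none _ _ hg]
  | some v =>
    rw [PySem.Dict.getD_eq_get?_getD, hg]
    have hmem : (x, v) ∈ chs := pvItems_ofList_sub chs (x, v) (PySem.Dict.mem_items_of_get?_eq_some _ hg)
    have := (PySem.List.le_foldl_max_nat chs (fun p => p.2.length) 0).2 _ hmem
    simp only [Option.getD_some]
    simp only [] at this
    have h2 : v.length ≤ chs.foldl (fun acc y => max acc y.2.length) 0 := this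
    omega

theorem pvKids_sub (chs : List (String × List String)) (x : String) :
    ∀ y ∈ pvKids chs x, y ∈ pvChVals chs := by
  intro y hy
  unfold pvKids at hy
  cases hg : PySem.Dict.get? (PySem.Dict.ofList chs) x with
  | none => rw [PySem.Dict.getD_of_get?_eq_none _ _ hg] at hy; cases hy
  | some v =>
    rw [PySem.Dict.getD_eq_get?_getD, hg] at hy
    have hmem : (x, v) ∈ chs := pvItems_ofList_sub chs (x, v) (PySem.Dict.mem_items_of_get?_eq_some _ hg)
    exact List.mem_flatMap.mpr ⟨(x, v), hmem, hy⟩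

-- fuel monotonicity of A's collect
theorem pvCollect_zero (ents chs : List (String × List String)) (x : String) (c : pvCache) :
    pvCollect ents chs 0 x c = none := rfl

theorem pvCollect_succ (ents chs : List (String × List String)) (f : Nat) (x : String) (c : pvCache) :
    pvCollect ents chs (f+1) x c =
      (match PySem.Dict.get? c x with
      | some cached => some (cached, c)
      | none =>
        match pvCollectKids (pvCollect ents chs f) (pvKids chs x) (PySem.Set.ofList (pvEnts ents x)) c with
        | none => none
        | some (nodes, c2) => some (nodes, PySem.Dict.insert c2 x nodes)) := rfl

theorem pvCollectKids_congr_mono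
    (r1 r2 : String → pvCache → Option (PySem.Set String × pvCache))
    (h : ∀ x c v, r1 x c = some v → r2 x c = some v) :
    ∀ l ns c v, pvCollectKids r1 l ns c = some v → pvCollectKids r2 l ns c = some v := by
  intro l
  induction l with
  | nil => intro ns c v hv; exact hv
  | cons ch rest ih =>
    intro ns c v hv
    simp only [pvCollectKids] at hv ⊢
    cases hr : r1 ch c with
    | none => rw [hr] at hv; cases hv
    | some p =>
      rw [hr] at hv
      rw [h _ _ _ hr]
      exact ih _ _ _ hv

theorem pvCollect_mono (ents chs : List (String × List String)) :
    ∀ f x c v, pvCollect ents chs f x c = some v → pvCollect ents chs (f+1) x c = some v := by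
  intro f
  induction f with
  | zero => intro x c v h; rw [pvCollect_zero] at h; cases h
  | succ f ih =>
    intro x c v h
    rw [pvCollect_succ] at h ⊢
    cases hg : PySem.Dict.get? c x with
    | some cached => rw [hg] at h; exact h
    | none =>
      rw [hg] at h
      cases hk : pvCollectKids (pvCollect ents chs f) (pvKids chs x) (PySem.Set.ofList (pvEnts ents x)) c with
      | none => rw [hk] at h; cases h
      | some p =>
        rw [hk] at h
        rw [pvCollectKids_congr_mono _ _ ih _ _ _ _ hk]
        exact h

theorem pvCollect_mono_le (ents chs : List (String × List String)) {f g : Nat} (hfg : f ≤ g) :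
    ∀ x c v, pvCollect ents chs f x c = some v → pvCollect ents chs g x c = some v := by
  induction g with
  | zero => intro x c v h; exact (Nat.le_zero.mp hfg) ▸ h
  | succ g ih =>
    intro x c v h
    rcases Nat.lt_or_ge f (g+1) with hlt | hge
    · exact pvCollect_mono ents chs g x c v (ih (Nat.lt_succ_iff.mp hlt) x c v h)
    · have : f = g + 1 := le_antisymm hfg hge
      exact this ▸ h

-- after a successful collect the collected name is cached with exactly the returned set
theorem pvCollect_caches (ents chs : List (String × List String)) :
    ∀ f x c ns c', pvCollect ents chs f x c = some (ns, c') → PySem.Dict.get? c' x = some ns := by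
  intro f x c ns c' h
  cases f with
  | zero => rw [pvCollect_zero] at h; cases h
  | succ f =>
    rw [pvCollect_succ] at h
    cases hg : PySem.Dict.get? c x with
    | some cached => rw [hg] at h; cases h; exact hg
    | none =>
      rw [hg] at h
      cases hk : pvCollectKids (pvCollect ents chs f) (pvKids chs x) (PySem.Set.ofList (pvEnts ents x)) c with
      | none => rw [hk] at h; cases h
      | some p =>
        rw [hk] at h
        cases h
        exact PySem.Dict.get?_insert_self _ _ _

-- collect never changes an entry that is already present
theorem pvCollectKids_preserves
    (rec : String → pvCache → Option (PySem.Set String × pvCache))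
    (hrec : ∀ x c ns c', rec x c = some (ns, c') → ∀ y v, PySem.Dict.get? c y = some v → PySem.Dict.get? c' y = some v) :
    ∀ l ns c out c'', pvCollectKids rec l ns c = some (out, c'') →
      ∀ y v, PySem.Dict.get? c y = some v → PySem.Dict.get? c'' y = some v := by
  intro l
  induction l with
  | nil => intro ns c out c'' h y v hy; cases h; exact hy
  | cons ch rest ih =>
    intro ns c out c'' h y v hy
    simp only [pvCollectKids] at h
    cases hr : rec ch c with
    | none => rw [hr] at h; cases h
    | some p =>
      rw [hr] at h
      exact ih _ _ _ _ h y v (hrec _ _ _ _ hr y v hy)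

theorem pvCollect_preserves (ents chs : List (String × List String)) :
    ∀ f x c ns c', pvCollect ents chs f x c = some (ns, c') →
      ∀ y v, PySem.Dict.get? c y = some v → PySem.Dict.get? c' y = some v := by
  intro f
  induction f with
  | zero => intro x c ns c' h; rw [pvCollect_zero] at h; cases h
  | succ f ih =>
    intro x c ns c' h y v hy
    rw [pvCollect_succ] at h
    cases hg : PySem.Dict.get? c x with
    | some cached => rw [hg] at h; cases h; exact hy
    | none =>
      rw [hg] at h
      cases hk : pvCollectKids (pvCollect ents chs f) (pvKids chs x) (PySem.Set.ofList (pvEnts ents x)) c with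
      | none => rw [hk] at h; cases h
      | some p =>
        rw [hk] at h
        cases h
        have hyp : PySem.Dict.get? p.2 y = some v := pvCollectKids_preserves _ ih _ _ _ _ _ hk y v hy
        have hne : y ≠ x := by
          intro he; rw [he] at hy; rw [hy] at hg; cases hg
        rw [PySem.Dict.get?_insert_of_ne _ _ hne]
        exact hyp

-- B's union-over-cached-children loop recomputes exactly the set the recursion built
theorem pvCollectKids_union (ents chs : List (String × List String)) (f : Nat) :
    ∀ l ns c out c'', pvCollectKids (pvCollect ents chs f) l ns c = some (out, c'') →
      pvUnionKids c'' l ns = some out := by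
  intro l
  induction l with
  | nil => intro ns c out c'' h; cases h; rfl
  | cons ch rest ih =>
    intro ns c out c'' h
    simp only [pvCollectKids] at h
    cases hr : pvCollect ents chs f ch c with
    | none => rw [hr] at h; cases h
    | some p =>
      rw [hr] at h
      have hcache : PySem.Dict.get? p.2 ch = some p.1 := pvCollect_caches ents chs _ _ _ _ _ hr
      have hkeep : PySem.Dict.get? c'' ch = some p.1 :=
        pvCollectKids_preserves _ (pvCollect_preserves ents chs f) _ _ _ _ _ h _ _ hcache
      simp only [pvUnionKids, hkeep]
      exact ih _ _ _ _ h

-- fuel monotonicity of B's while-loop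
theorem pvLoop_zero (ents chs : List (String × List String)) (st : List (String × Bool)) (c : pvCache) :
    pvLoop ents chs 0 st c = none := rfl

theorem pvLoop_succ_nil (ents chs : List (String × List String)) (f : Nat) (c : pvCache) :
    pvLoop ents chs (f+1) [] c = some c := rfl

theorem pvLoop_succ_cons (ents chs : List (String × List String)) (f : Nat) (name : String)
    (expanded : Bool) (st : List (String × Bool)) (c : pvCache) :
    pvLoop ents chs (f+1) ((name, expanded) :: st) c =
      (if expanded then
        match pvUnionKids c (pvKids chs name) (PySem.Set.ofList (pvEnts ents name)) with
        | none => none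
        | some nodes => pvLoop ents chs f st (PySem.Dict.insert c name nodes)
      else if PySem.Dict.contains c name then
        pvLoop ents chs f st c
      else
        pvLoop ents chs f ((pvKids chs name).reverse.foldl (fun s ch => (ch, false) :: s) ((name, true) :: st)) c) := rfl

theorem pvLoop_mono (ents chs : List (String × List String)) :
    ∀ f st c r, pvLoop ents chs f st c = some r → pvLoop ents chs (f+1) st c = some r := by
  intro f
  induction f with
  | zero => intro st c r h; rw [pvLoop_zero] at h; cases h
  | succ f ih =>
    intro st c r h
    cases st with
    | nil => rw [pvLoop_succ_nil] at h ⊢; exact h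
    | cons top rest =>
      obtain ⟨name, expanded⟩ := top
      rw [pvLoop_succ_cons] at h ⊢
      cases expanded with
      | true =>
        simp only [if_true] at h ⊢
        cases hu : pvUnionKids c (pvKids chs name) (PySem.Set.ofList (pvEnts ents name)) with
        | none => rw [hu] at h; simp at h
        | some nodes => rw [hu] at h; exact ih _ _ _ h
      | false =>
        simp only [Bool.false_eq_true, if_false] at h ⊢
        by_cases hc : PySem.Dict.contains c name
        · rw [if_pos hc] at h ⊢; exact ih _ _ _ h
        · rw [if_neg hc] at h ⊢; exact ih _ _ _ h

theorem pvLoop_mono_le (ents chs : List (String × List String)) {f g : Nat} (hfg : f ≤ g) :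
    ∀ st c r, pvLoop ents chs f st c = some r → pvLoop ents chs g st c = some r := by
  induction g with
  | zero => intro st c r h; exact (Nat.le_zero.mp hfg) ▸ h
  | succ g ih =>
    intro st c r h
    rcases Nat.lt_or_ge f (g+1) with hlt | hge
    · exact pvLoop_mono ents chs g _ _ _ (ih (Nat.lt_succ_iff.mp hlt) _ _ _ h)
    · exact (le_antisymm hfg hge) ▸ h

-- pushing the reversed child list leaves the children on top in their original order
theorem pvPush_shape (l : List String) :
    ∀ st : List (String × Bool),
      l.reverse.foldl (fun s ch => (ch, false) :: s) st = l.map (fun ch => (ch, false)) ++ st := by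
  induction l with
  | nil => intro st; rfl
  | cons a l ih =>
    intro st
    rw [List.reverse_cons, List.foldl_append]
    simp only [List.foldl_cons, List.foldl_nil, List.map_cons, List.cons_append]
    rw [ih]

-- THE SIMULATION: one successful recursive collect is one block of B's loop iterations
theorem pvSim (ents chs : List (String × List String)) :
    ∀ f x c ns c', pvCollect ents chs f x c = some (ns, c') →
      ∀ g st r, pvLoop ents chs g st c' = some r →
        pvLoop ents chs (pvC chs ^ f + g) ((x, false) :: st) c = some r := by
  intro f
  induction f with
  | zero => intro x c ns c' h; rw [pvCollect_zero] at h; cases h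
  | succ f ih =>
    -- the children block, by induction over the child list
    have simKids : ∀ (l : List String) ns0 c0 out c'',
        pvCollectKids (pvCollect ents chs f) l ns0 c0 = some (out, c'') →
        ∀ g stk r, pvLoop ents chs g stk c'' = some r →
          pvLoop ents chs (l.length * pvC chs ^ f + g) (l.map (fun ch => (ch, false)) ++ stk) c0 = some r := by
      intro l
      induction l with
      | nil => intro ns0 c0 out c'' h g stk r hr; cases h; simpa using hr
      | cons ch rest ihl =>
        intro ns0 c0 out c'' h g stk r hr
        simp only [pvCollectKids] at h
        cases hc : pvCollect ents chs f ch c0 with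
        | none => rw [hc] at h; cases h
        | some p =>
          rw [hc] at h
          have hrest := ihl _ _ _ _ h g stk r hr
          have := ih ch c0 p.1 p.2 (by rw [hc]) (rest.length * pvC chs ^ f + g)
            (rest.map (fun ch => (ch, false)) ++ stk) r hrest
          have harith : (ch :: rest).length * pvC chs ^ f + g
              = pvC chs ^ f + (rest.length * pvC chs ^ f + g) := by
            simp only [List.length_cons]; ring
          rw [harith]
          simpa using this
    intro x c ns c' h g st r hr
    have hC1 : 1 ≤ pvC chs ^ (f+1) := Nat.one_le_pow _ _ (by unfold pvC; omega)
    obtain ⟨m, hm⟩ : ∃ m, pvC chs ^ (f+1) + g = m + 1 := ⟨pvC chs ^ (f+1) + g - 1, by omega⟩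
    rw [pvCollect_succ] at h
    cases hg : PySem.Dict.get? c x with
    | some cached =>
      rw [hg] at h
      cases h
      rw [hm, pvLoop_succ_cons]
      simp only [Bool.false_eq_true, if_false]
      rw [if_pos (by rw [PySem.Dict.contains_eq_isSome_get?, hg]; rfl)]
      exact pvLoop_mono_le ents chs (by omega) _ _ _ hr
    | none =>
      rw [hg] at h
      cases hk : pvCollectKids (pvCollect ents chs f) (pvKids chs x) (PySem.Set.ofList (pvEnts ents x)) c with
      | none => rw [hk] at h; cases h
      | some p =>
        rw [hk] at h
        cases h
        -- the (x, true) frame: recompute the set from the cache and insert it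
        have hT : pvLoop ents chs (g+1) ((x, true) :: st) p.2 = some r := by
          rw [pvLoop_succ_cons]
          simp only [if_true]
          rw [pvCollectKids_union ents chs f _ _ _ _ _ hk]
          exact hr
        have hblock := simKids (pvKids chs x) _ c _ _ hk (g+1) ((x, true) :: st) r hT
        -- fuel accounting
        have hK := pvKids_len_le chs x
        have hpow : 1 ≤ pvC chs ^ f := Nat.one_le_pow _ _ (by unfold pvC; omega)
        have harith : (pvKids chs x).length * pvC chs ^ f + (g + 1) ≤ m := by
          have h1 : (pvKids chs x).length * pvC chs ^ f + 2 * pvC chs ^ f ≤ pvC chs * pvC chs ^ f := by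
            nlinarith [hK, hpow]
          have h2 : pvC chs ^ (f+1) = pvC chs * pvC chs ^ f := by ring
          omega
        rw [hm, pvLoop_succ_cons]
        simp only [Bool.false_eq_true, if_false]
        rw [if_neg (by rw [PySem.Dict.contains_eq_isSome_get?, hg]; simp)]
        rw [pvPush_shape]
        exact pvLoop_mono_le ents chs harith _ _ _ hblock

-- ===== termination of the memoized recursion under Pre_ (acyclic child graph) =====

-- length of the longest child chain from x, computed with bounded lookahead
def pvRank (chs : List (String × List String)) : Nat → String → Nat
  | 0, _ => 0
  | f+1, x => (pvKids chs x).foldl (fun m ch => max m (pvRank chs f ch + 1)) 0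

theorem pvRank_le (chs : List (String × List String)) : ∀ f x, pvRank chs f x ≤ f := by
  intro f
  induction f with
  | zero => intro x; exact Nat.le_refl 0
  | succ f ih =>
    intro x
    exact pvFoldMax_le _ _ _ _ (Nat.zero_le _) (fun ch _ => Nat.succ_le_succ (ih ch))

theorem pvRank_kid_le (chs : List (String × List String)) (f : Nat) {x ch : String}
    (h : ch ∈ pvKids chs x) : pvRank chs f ch + 1 ≤ pvRank chs (f+1) x :=
  (PySem.List.le_foldl_max_nat (pvKids chs x) (fun ch => pvRank chs f ch + 1) 0).2 ch h

theorem pvRank_increase (chs : List (String × List String)) :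
    ∀ f x, pvRank chs f x < pvRank chs (f+1) x →
      ∃ a : Nat → String, a 0 = x ∧ ∀ t < f+1, a (t+1) ∈ pvKids chs (a t) := by
  intro f
  induction f with
  | zero =>
    intro x h
    have hx1 : pvRank chs 1 x = (pvKids chs x).foldl (fun m ch => max m (pvRank chs 0 ch + 1)) 0 := rfl
    rcases pvFoldMax_attained (pvKids chs x) (fun ch => pvRank chs 0 ch + 1) 0 with he | ⟨ch, hch, he⟩
    · rw [hx1, he] at h; exact absurd h (by simp [pvRank])
    · refine ⟨fun t => if t = 0 then x else ch, rfl, ?_⟩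
      intro t ht
      interval_cases t
      simpa using hch
  | succ f ih =>
    intro x h
    have hx2 : pvRank chs (f+2) x =
        (pvKids chs x).foldl (fun m ch => max m (pvRank chs (f+1) ch + 1)) 0 := rfl
    rcases pvFoldMax_attained (pvKids chs x) (fun ch => pvRank chs (f+1) ch + 1) 0 with he | ⟨ch, hch, he⟩
    · rw [hx2, he] at h; omega
    · have hgt : pvRank chs f ch < pvRank chs (f+1) ch := by
        have h1 := pvRank_kid_le chs f hch
        rw [hx2, he] at h
        omega
      obtain ⟨a, ha0, hstep⟩ := ih ch hgt
      refine ⟨fun t => match t with | 0 => x | t+1 => a t, rfl, ?_⟩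
      intro t ht
      cases t with
      | zero => simpa [ha0] using hch
      | succ t => exact hstep t (by omega)

-- reachability lemmas
theorem pvReach_step (chs : List (String × List String)) :
    ∀ k S x y, x ∈ pvReach chs k S → y ∈ pvKids chs x → y ∈ pvReach chs (k+1) S := by
  intro k
  induction k with
  | zero =>
    intro S x y hx hy
    exact List.mem_dedup.mpr (List.mem_append_right _ (List.mem_flatMap.mpr ⟨x, hx, hy⟩))
  | succ k ih =>
    intro S x y hx hy
    exact ih _ x y hx hy

theorem pvReach_fuel_mono (chs : List (String × List String)) :
    ∀ k S x, x ∈ pvReach chs k S → x ∈ pvReach chs (k+1) S := by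
  intro k
  induction k with
  | zero =>
    intro S x hx
    exact List.mem_dedup.mpr (List.mem_append_left _ hx)
  | succ k ih =>
    intro S x hx
    exact ih _ _ hx

theorem pvReach_fuel_le (chs : List (String × List String)) {k k' : Nat} (h : k ≤ k') :
    ∀ S x, x ∈ pvReach chs k S → x ∈ pvReach chs k' S := by
  induction k' with
  | zero => intro S x hx; exact (Nat.le_zero.mp h) ▸ hx
  | succ k' ih =>
    intro S x hx
    rcases Nat.lt_or_ge k (k'+1) with hlt | hge
    · exact pvReach_fuel_mono chs k' _ _ (ih (Nat.lt_succ_iff.mp hlt) _ _ hx)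
    · exact (le_antisymm h hge) ▸ hx

theorem pvChain_reach (chs : List (String × List String)) (a : Nat → String) :
    ∀ k, 1 ≤ k → (∀ t < k, a (t+1) ∈ pvKids chs (a t)) →
      a k ∈ pvReach chs (k-1) (pvKids chs (a 0)) := by
  intro k
  induction k with
  | zero => omega
  | succ k ih =>
    intro _ hstep
    cases Nat.eq_zero_or_pos k with
    | inl h0 =>
      subst h0
      exact hstep 0 (by omega)
    | inr hpos =>
      have hk := ih hpos (fun t ht => hstep t (by omega))
      have := pvReach_step chs (k-1) _ _ _ hk (hstep k (by omega))
      have hEq : k - 1 + 1 = k := by omega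
      rw [hEq] at this
      exact this

-- ===== reach-set stabilization: pvReach with budget pvM is closed under the child relation =====

def pvNxt (chs : List (String × List String)) (S : List String) : List String :=
  (S ++ S.flatMap (pvKids chs)).dedup

theorem pvReach_succ_eq (chs : List (String × List String)) :
    ∀ k S, pvReach chs (k+1) S = pvNxt chs (pvReach chs k S) := by
  intro k
  induction k with
  | zero => intro S; rfl
  | succ k ih => intro S; exact ih (pvNxt chs S)

theorem pvMem_nxt (chs : List (String × List String)) (T : List String) (z : String) :
    z ∈ pvNxt chs T ↔ z ∈ T ∨ ∃ x ∈ T, z ∈ pvKids chs x := by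
  simp [pvNxt, List.mem_dedup, List.mem_append, List.mem_flatMap]

theorem pvNxt_mono (chs : List (String × List String)) {T1 T2 : List String}
    (h : ∀ z, z ∈ T1 → z ∈ T2) : ∀ z, z ∈ pvNxt chs T1 → z ∈ pvNxt chs T2 := by
  intro z hz
  rcases (pvMem_nxt chs T1 z).mp hz with h1 | ⟨x, hx, hk⟩
  · exact (pvMem_nxt chs T2 z).mpr (Or.inl (h z h1))
  · exact (pvMem_nxt chs T2 z).mpr (Or.inr ⟨x, h x hx, hk⟩)

theorem pvReach_sub (chs : List (String × List String)) :
    ∀ k (S : List String) z, z ∈ pvReach chs k S → z ∈ S ∨ z ∈ pvChVals chs := by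
  intro k
  induction k with
  | zero => intro S z hz; exact Or.inl hz
  | succ k ih =>
    intro S z hz
    rw [pvReach_succ_eq] at hz
    rcases (pvMem_nxt chs _ z).mp hz with h1 | ⟨x, _, hk⟩
    · exact ih S z h1
    · exact Or.inr (pvKids_sub chs x z hk)

theorem pvReach_fix (chs : List (String × List String)) {j : Nat} {S : List String}
    (hfix : ∀ z, z ∈ pvReach chs (j+1) S → z ∈ pvReach chs j S) :
    ∀ k z, z ∈ pvReach chs k S → z ∈ pvReach chs j S := by
  intro k
  induction k with
  | zero => intro z hz; exact pvReach_fuel_le chs (Nat.zero_le j) S z hz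
  | succ k ih =>
    intro z hz
    rw [pvReach_succ_eq] at hz
    have h1 : z ∈ pvNxt chs (pvReach chs j S) := pvNxt_mono chs ih z hz
    rw [← pvReach_succ_eq] at h1
    exact hfix z h1

theorem pvReach_stab (chs : List (String × List String)) (S : List String) :
    ∀ k z, z ∈ pvReach chs k S → z ∈ pvReach chs (S.dedup.length + pvN chs) S := by
  by_cases hex : ∃ j, j ≤ S.dedup.length + pvN chs ∧
      ∀ z, z ∈ pvReach chs (j+1) S → z ∈ pvReach chs j S
  · obtain ⟨j, hj, hfix⟩ := hex
    intro k z hz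
    exact pvReach_fuel_le chs hj S z (pvReach_fix chs hfix k z hz)
  · exfalso
    have hex' : ∀ j, j ≤ S.dedup.length + pvN chs →
        ∃ z, z ∈ pvReach chs (j+1) S ∧ z ∉ pvReach chs j S := by
      intro j hj
      by_contra hno
      refine hex ⟨j, hj, fun z hz => ?_⟩
      by_contra hzz
      exact hno ⟨z, hz, hzz⟩
    have hcard : ∀ t, t ≤ S.dedup.length + pvN chs + 1 →
        t ≤ ((pvReach chs t S).toFinset).card := by
      intro t
      induction t with
      | zero => intro _; omega
      | succ t ih =>
        intro ht
        obtain ⟨z, hz1, hz2⟩ := hex' t (by omega)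
        have hsub : (pvReach chs t S).toFinset ⊂ (pvReach chs (t+1) S).toFinset := by
          refine Finset.ssubset_iff_of_subset ?_ |>.mpr ⟨z, List.mem_toFinset.mpr hz1, fun hc => hz2 (List.mem_toFinset.mp hc)⟩
          intro w hw
          exact List.mem_toFinset.mpr (pvReach_fuel_mono chs t S w (List.mem_toFinset.mp hw))
        have := Finset.card_lt_card hsub
        have h1 := ih (by omega)
        omega
    have hbound : ((pvReach chs (S.dedup.length + pvN chs + 1) S).toFinset).card
        ≤ S.dedup.length + pvN chs := by
      have hsub : (pvReach chs (S.dedup.length + pvN chs + 1) S).toFinset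
          ⊆ S.toFinset ∪ (pvChVals chs).toFinset := by
        intro z hz
        rcases pvReach_sub chs _ S z (List.mem_toFinset.mp hz) with h1 | h1
        · exact Finset.mem_union_left _ (List.mem_toFinset.mpr h1)
        · exact Finset.mem_union_right _ (List.mem_toFinset.mpr h1)
      calc ((pvReach chs (S.dedup.length + pvN chs + 1) S).toFinset).card
          ≤ (S.toFinset ∪ (pvChVals chs).toFinset).card := Finset.card_le_card hsub
        _ ≤ S.toFinset.card + ((pvChVals chs).toFinset).card := Finset.card_union_le _ _
        _ = S.dedup.length + pvN chs := by rw [List.card_toFinset, List.card_toFinset]; rfl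
    have := hcard (S.dedup.length + pvN chs + 1) (by omega)
    omega

theorem pvRSet_closed (packages : List String) (chs : List (String × List String)) {x y : String}
    (hx : x ∈ pvReach chs (pvM packages chs) packages) (hy : y ∈ pvKids chs x) :
    y ∈ pvReach chs (pvM packages chs) packages :=
  pvReach_stab chs packages _ y (pvReach_step chs _ _ _ _ hx hy)

-- under Pre_ the rank of every reachable child value is already stable at lookahead pvN
theorem pvStab (packages : List String) (chs : List (String × List String))
    (hpre : ∀ x ∈ pvChVals chs, x ∈ pvReach chs (pvM packages chs) packages →
      x ∉ pvReach chs (pvN chs) (pvKids chs x)) :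
    ∀ y ∈ pvChVals chs, y ∈ pvReach chs (pvM packages chs) packages →
      pvRank chs (pvN chs + 1) y ≤ pvRank chs (pvN chs) y := by
  intro y hy hyR
  by_contra hcon
  obtain ⟨a, ha0, hstep⟩ := pvRank_increase chs (pvN chs) y (Nat.lt_of_not_le hcon)
  have hmem : ∀ t, t ≤ pvN chs + 1 → a t ∈ pvChVals chs := by
    intro t
    induction t with
    | zero => intro _; rw [ha0]; exact hy
    | succ t iht =>
      intro ht
      exact pvKids_sub chs (a t) _ (hstep t (by omega))
  have hmemR : ∀ t, t ≤ pvN chs + 1 → a t ∈ pvReach chs (pvM packages chs) packages := by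
    intro t
    induction t with
    | zero => intro _; rw [ha0]; exact hyR
    | succ t iht =>
      intro ht
      exact pvRSet_closed packages chs (iht (by omega)) (hstep t (by omega))
  have hcard : ((pvChVals chs).toFinset).card < (Finset.range (pvN chs + 2)).card := by
    rw [Finset.card_range, List.card_toFinset]
    unfold pvN
    omega
  have hmaps : Set.MapsTo a ↑(Finset.range (pvN chs + 2)) ↑((pvChVals chs).toFinset) := by
    intro i hi
    simp only [Finset.coe_range, Set.mem_Iio] at hi
    simp only [List.coe_toFinset, Set.mem_setOf_eq]
    exact hmem i (by omega)
  obtain ⟨i, hi, j, hj, hne, heq⟩ := Finset.exists_ne_map_eq_of_card_lt_of_maps_to hcard hmaps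
  simp only [Finset.mem_range] at hi hj
  -- symmetric in i and j: reduce to i < j
  have key : ∀ i j, i < j → j ≤ pvN chs + 1 → a i = a j → False := by
    intro i j hij hjN hEq
    have hchain : ∀ t < j - i, a (i + t + 1) ∈ pvKids chs (a (i + t)) := by
      intro t ht
      exact hstep (i + t) (by omega)
    have := pvChain_reach chs (fun t => a (i + t)) (j - i) (by omega)
      (by intro t ht; simpa [Nat.add_assoc] using hchain t ht)
    simp only [Nat.add_zero] at this
    have hji : i + (j - i) = j := by omega
    rw [hji] at this
    rw [← hEq] at this
    have hfin : a i ∈ pvReach chs (pvN chs) (pvKids chs (a i)) :=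
      pvReach_fuel_le chs (by omega) _ _ this
    exact hpre (a i) (hmem i (by omega)) (hmemR i (by omega)) hfin
  rcases Nat.lt_or_ge i j with hij | hij
  · exact (key i j hij (by omega) heq).elim
  · have : j < i := by omega
    exact (key j i this (by omega) heq.symm).elim

theorem pvRank_kid_lt (packages : List String) (chs : List (String × List String))
    (hpre : ∀ x ∈ pvChVals chs, x ∈ pvReach chs (pvM packages chs) packages →
      x ∉ pvReach chs (pvN chs) (pvKids chs x))
    {x ch : String} (hx : x ∈ pvReach chs (pvM packages chs) packages) (h : ch ∈ pvKids chs x) :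
    pvRank chs (pvN chs + 1) ch < pvRank chs (pvN chs + 1) x := by
  have h1 := pvRank_kid_le chs (pvN chs) h
  have h2 := pvStab packages chs hpre ch (pvKids_sub chs x ch h) (pvRSet_closed packages chs hx h)
  omega

-- collect terminates within its fuel on every package admitted by Pre_
theorem pvCollect_term (packages : List String) (ents chs : List (String × List String))
    (hpre : ∀ x ∈ pvChVals chs, x ∈ pvReach chs (pvM packages chs) packages →
      x ∉ pvReach chs (pvN chs) (pvKids chs x)) :
    ∀ n x, pvRank chs (pvN chs + 1) x = n → x ∈ pvReach chs (pvM packages chs) packages →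
      ∀ c, ∃ r, pvCollect ents chs (n + 1) x c = some r := by
  intro n
  induction n using Nat.strong_induction_on with
  | _ n ih =>
    intro x hn hxR c
    rw [pvCollect_succ]
    cases hg : PySem.Dict.get? c x with
    | some cached => exact ⟨(cached, c), rfl⟩
    | none =>
      have hkids : ∀ l, (∀ ch ∈ l, pvRank chs (pvN chs + 1) ch < n ∧
          ch ∈ pvReach chs (pvM packages chs) packages) → ∀ ns c0,
          ∃ out c'', pvCollectKids (pvCollect ents chs n) l ns c0 = some (out, c'') := by
        intro l
        induction l with
        | nil => intro _ ns c0; exact ⟨ns, c0, rfl⟩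
        | cons ch rest ihl =>
          intro hlt ns c0
          obtain ⟨hch, hchR⟩ := hlt ch (List.mem_cons_self)
          obtain ⟨r1, hr1⟩ := ih _ hch ch rfl hchR c0
          have hr1' : pvCollect ents chs n ch c0 = some r1 :=
            pvCollect_mono_le ents chs (by omega) _ _ _ hr1
          obtain ⟨out, c'', hrest⟩ := ihl (fun y hy => hlt y (List.mem_cons_of_mem _ hy)) (PySem.Set.update ns r1.1) r1.2
          refine ⟨out, c'', ?_⟩
          simp only [pvCollectKids, hr1']
          exact hrest
      obtain ⟨out, c'', hk⟩ := hkids (pvKids chs x)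
        (fun ch hch => ⟨hn ▸ pvRank_kid_lt packages chs hpre hxR hch,
          pvRSet_closed packages chs hxR hch⟩) (PySem.Set.ofList (pvEnts ents x)) c
      exact ⟨(out, PySem.Dict.insert c'' x out), by rw [hk]⟩

theorem pvCollect_termA (packages : List String) (ents chs : List (String × List String))
    (hpre : ∀ x ∈ pvChVals chs, x ∈ pvReach chs (pvM packages chs) packages →
      x ∉ pvReach chs (pvN chs) (pvKids chs x)) :
    ∀ x, x ∈ pvReach chs (pvM packages chs) packages →
      ∀ c, ∃ r, pvCollect ents chs (pvFuelA chs) x c = some r := by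
  intro x hxR c
  obtain ⟨r, hr⟩ := pvCollect_term packages ents chs hpre _ x rfl hxR c
  refine ⟨r, pvCollect_mono_le ents chs ?_ _ _ _ hr⟩
  have := pvRank_le chs (pvN chs + 1) x
  unfold pvFuelA
  omega

-- the two per-package steps agree, hence so do the two folds
theorem pvFold_eq (packages : List String) (ents chs : List (String × List String))
    (hpre : ∀ x ∈ pvChVals chs, x ∈ pvReach chs (pvM packages chs) packages →
      x ∉ pvReach chs (pvN chs) (pvKids chs x)) :
    ∀ (l : List String), (∀ p ∈ l, p ∈ packages) → ∀ (c : pvCache),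
      l.foldl (fun c p =>
        match pvCollect ents chs (pvFuelA chs) p c with
        | none => c
        | some r => r.2) c
      = l.foldl (fun c root =>
        match pvLoop ents chs (pvFuelB chs) [(root, false)] c with
        | none => c
        | some c' => c') c := by
  intro l
  induction l with
  | nil => intro _ c; rfl
  | cons p rest ih =>
    intro hl c
    have hpR : p ∈ pvReach chs (pvM packages chs) packages :=
      pvReach_fuel_le chs (Nat.zero_le _) packages p (hl p (List.mem_cons_self))
    obtain ⟨⟨ns, c'⟩, hA⟩ := pvCollect_termA packages ents chs hpre p hpR c
    have hB : pvLoop ents chs (pvFuelB chs) [(p, false)] c = some c' := by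
      have := pvSim ents chs (pvFuelA chs) p c ns c' hA 1 [] c' (pvLoop_succ_nil ents chs 0 c')
      simpa [pvFuelB, pvFuelA] using this
    simp only [List.foldl_cons, hA, hB]
    exact ih (fun q hq => hl q (List.mem_cons_of_mem _ hq)) c'

theorem build_subtree_cache_spec : Claim_equal_build_subtree_cache := by
  intro packages package_entities package_children hdom hpre
  unfold Spec_build_subtree_cache
  unfold Pre_build_subtree_cache at hpre
  unfold build_subtree_cache build_subtree_cache_alt
  rw [pvFold_eq packages package_entities package_children hpre _
    (fun p hp => (PySem.List.mem_sorted _ _ _ _).mp hp)]
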